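-- pv_equiv track=rewrite | github.com/lindseymturner/cs105-labs | Sorting/useful_functions.py | just_letters_as_lowercase
-- ===== SOURCE A (Python) =====
-- def just_letters_as_lowercase(text: str) -> str:
--     """
--     >>> just_letters_as_lowercase("thequickbrownfoxjumpedoverthelazydog")
--     'thequickbrownfoxjumpedoverthelazydog'
--     >>> just_letters_as_lowercase("The quick Brown Fox jumped over the Lazy Dog.")
--     'thequickbrownfoxjumpedoverthelazydog'
--     >>> just_letters_as_lowercase("")
--     ''
--     """
--     lowercase_letters:  str = 'abcdefghijklmnopqrstuvwxyz'
--     lowercase_text = text.lower()  # built into python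
--     if lowercase_text == "":
--         return lowercase_text
--     elif lowercase_text[0] in lowercase_letters:
--         return lowercase_text[0] + just_letters_as_lowercase(lowercase_text[1:])
--     else:
--         return just_letters_as_lowercase(lowercase_text[1:])
-- ===== SOURCE B (Python) =====
-- def just_letters_as_lowercase(text: str) -> str:
--     # Iterative single pass: lowercase once, filter a-z with an accumulator.
--     lowercase_letters: str = 'abcdefghijklmnopqrstuvwxyz'
--     out = []
--     for ch in text.lower():
--         if ch in lowercase_letters:
--             out.append(ch)
--     return ''.join(out)
-- ===== Notes on version B (the rewrite author's own statement) =====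
-- stated objective: faster
-- what changed: Replaced A's head+tail recursion (which re-lowercases and re-slices the remaining string at every step) with a single iterative pass over text.lower() accumulating matching characters in a list.
import Mathlib
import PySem

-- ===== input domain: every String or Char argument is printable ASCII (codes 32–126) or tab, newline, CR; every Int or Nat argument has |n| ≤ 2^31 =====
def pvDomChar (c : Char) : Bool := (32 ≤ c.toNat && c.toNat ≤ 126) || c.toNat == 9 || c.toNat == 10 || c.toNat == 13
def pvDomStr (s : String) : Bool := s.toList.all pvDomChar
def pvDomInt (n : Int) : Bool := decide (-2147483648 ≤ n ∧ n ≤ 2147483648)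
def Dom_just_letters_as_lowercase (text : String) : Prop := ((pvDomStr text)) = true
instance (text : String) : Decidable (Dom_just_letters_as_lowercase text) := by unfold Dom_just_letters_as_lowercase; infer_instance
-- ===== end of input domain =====

-- B replaces A's head+tail recursion by one iterative filtering pass over the lowered string (faster: no per-step re-lowering/slicing).


-- ===== PORT A =====
-- A's recursion, on the code-point list: lower the remaining string each call,
-- keep the head if it is in 'abcdefghijklmnopqrstuvwxyz', recurse on the tail.
def jllRecA (s : List Char) : List Char :=
  match h : PySem.Chars.lower s with
  | [] => []
  | c :: rest =>
    if ("abcdefghijklmnopqrstuvwxyz".toList).contains c then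
      c :: jllRecA rest
    else
      jllRecA rest
termination_by s.length
decreasing_by
  all_goals
    (have hl := congrArg List.length h
     simp [PySem.Chars.lower] at hl
     omega)

def just_letters_as_lowercase (text : String) : String :=
  String.mk (jllRecA text.toList)

-- ===== PORT B =====
-- B: lower once, then one fold over the characters appending the a-z ones.
def just_letters_as_lowercase_alt (text : String) : String :=
  String.mk
    ((PySem.Str.lower text).toList.foldl
      (fun acc c =>
        if ("abcdefghijklmnopqrstuvwxyz".toList).contains c then acc ++ [c] else acc)
      [])

-- ===== PRECONDITION & SPEC =====
def Spec_just_letters_as_lowercase (text : String) (out : String) : Prop := out = just_letters_as_lowercase_alt text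
instance (text : String) (out : String) : Decidable (Spec_just_letters_as_lowercase text out) := by unfold Spec_just_letters_as_lowercase; infer_instance

-- ===== CLAIM (what is proved, stated in full; the proofs are below) =====
def Claim_equal_just_letters_as_lowercase : Prop := ∀ (text : String), Dom_just_letters_as_lowercase text → Spec_just_letters_as_lowercase text (just_letters_as_lowercase text)

-- ===== LEMMAS AND PROOFS =====
theorem lowerChar_idem (c : Char) : PySem.Chars.lowerChar (PySem.Chars.lowerChar c) = PySem.Chars.lowerChar c := by
  unfold PySem.Chars.lowerChar PySem.Chars.isupper
  by_cases h1 : 'A' ≤ c ∧ c ≤ 'Z'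
  · have hA : (65:Nat) ≤ c.toNat := h1.1
    have hZ : c.toNat ≤ 90 := h1.2
    have hv : (Char.ofNat (c.toNat + 32)).toNat = c.toNat + 32 := by
      rw [Char.toNat_ofNat, if_pos]
      left; omega
    simp only [h1.1, h1.2, decide_true, Bool.and_self, if_true]
    have hne : ¬ ('A' ≤ Char.ofNat (c.toNat + 32) ∧ Char.ofNat (c.toNat + 32) ≤ 'Z') := by
      intro h2
      have h3 : (65:Nat) ≤ (Char.ofNat (c.toNat + 32)).toNat := h2.1
      have h4 : (Char.ofNat (c.toNat + 32)).toNat ≤ 90 := h2.2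
      omega
    rcases Decidable.not_and_iff_not_or_not.mp hne with h | h <;> simp [h]
  · rcases Decidable.not_and_iff_not_or_not.mp h1 with h | h <;> simp [h]

theorem lower_idem (s : List Char) : PySem.Chars.lower (PySem.Chars.lower s) = PySem.Chars.lower s := by
  simp [PySem.Chars.lower, Function.comp, lowerChar_idem]

theorem jllRecA_eq_filter_aux (n : Nat) :
    ∀ (s : List Char), s.length ≤ n →
      jllRecA s = (PySem.Chars.lower s).filter
        (fun c => ("abcdefghijklmnopqrstuvwxyz".toList).contains c) := by
  induction n with
  | zero =>
    intro s hs
    have : s = [] := List.length_eq_zero_iff.mp (Nat.le_zero.mp hs)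
    subst this
    rw [jllRecA]
    simp [PySem.Chars.lower]
  | succ n ih =>
    intro s hs
    rw [jllRecA.eq_def]
    split
    · next h => simp [h]
    · next c rest h =>
      have hlen : (PySem.Chars.lower s).length = s.length := by
        simp [PySem.Chars.lower]
      have hrest : rest.length ≤ n := by
        rw [h] at hlen; simp at hlen; omega
      have hlr : PySem.Chars.lower rest = rest := by
        have := lower_idem s
        rw [h] at this
        simp [PySem.Chars.lower] at this ⊢
        exact this.2
      have hrec := ih rest hrest
      rw [hlr] at hrec
      rw [h, List.filter_cons]
      split_ifs with hc <;> simp [hc, hrec]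

theorem jllRecA_eq_filter (s : List Char) :
    jllRecA s = (PySem.Chars.lower s).filter
      (fun c => ("abcdefghijklmnopqrstuvwxyz".toList).contains c) :=
  jllRecA_eq_filter_aux s.length s le_rfl

-- ===== VERDICT (by name: the statement is the Claim_ definition above) =====
theorem just_letters_as_lowercase_spec : Claim_equal_just_letters_as_lowercase := by
  intro text _
  unfold Spec_just_letters_as_lowercase just_letters_as_lowercase just_letters_as_lowercase_alt
  rw [PySem.List.foldl_append_if_eq_filter, jllRecA_eq_filter]
  simp only [PySem.Str.toList_lower, List.nil_append]
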